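-- pv_equiv track=rewrite | github.com/DanilkaFish/Updated_TT | data/data_processing.py | st_enumeration3
-- ===== SOURCE A (Python) =====
-- def st_enumeration3(nmodes: int = 30):
--     """
--     Standard numeration for alpha_beta_tree which is effective on my opinion
--     """
--     # nmodes = 36
--     k = nmodes // 4 + 1
--     j = nmodes // 2 % 2
--     num_list = []
--
--     if nmodes % 2 == 0 and nmodes > 2:
--         for i in range(1, k):
--             num_list = num_list + [2 * i - 1] + [nmodes - 2 * i + 1]
--         if j == 1:
--             num_list = num_list + [nmodes // 2]
--
--         for i in range(1, k):
--             num_list = num_list + [2 * i] + [nmodes - 2 * i + 2]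
--         if j == 1:
--             num_list = num_list + [nmodes // 2 + 1]
--
--         for i in range(1, k):
--             num_list = num_list + [nmodes + 2 * i - 1] + [2 * nmodes - 2 * i + 1]
--         if j == 1:
--             num_list = num_list + [nmodes // 2 + nmodes]
--
--         for i in range(1, k):
--             num_list = num_list + [nmodes + 2 * i] + [2 * nmodes - 2 * i + 2]
--         if j == 1:
--             num_list = num_list + [nmodes // 2 + nmodes + 1]
--
--     return num_list
-- ===== SOURCE B (Python) =====
-- def st_enumeration3(nmodes: int = 30):
--     # Closed-form: the value at each output position q is computed directly from q.
--     if nmodes % 2 != 0 or nmodes <= 2: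
--         return []
--     n = nmodes
--     m = n // 2
--     def value(q):
--         b, p = divmod(q, m)          # block index 0..3 and position inside the block
--         s = 1 + b % 2                # block parity start (odd/even block)
--         o = n * (b // 2)             # upper two blocks are shifted by n
--         if m % 2 == 1 and p == m - 1:
--             return o + m + s - 1     # the middle element
--         if p % 2 == 0:
--             return o + s + p         # ascending entry
--         return o + n - p + s - 1     # descending entry
--     return [value(q) for q in range(2 * n)]
-- ===== Notes on version B (the rewrite author's own statement) =====
-- stated objective: alternative
-- what changed: B replaces A's four concatenation loops by a direct position-to-value map: each output entry is computed in closed form from its index via block/offset/parity arithmetic (divmod by the half-length), so the list is produced as a single comprehension over range(2*nmodes).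
import Mathlib
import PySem

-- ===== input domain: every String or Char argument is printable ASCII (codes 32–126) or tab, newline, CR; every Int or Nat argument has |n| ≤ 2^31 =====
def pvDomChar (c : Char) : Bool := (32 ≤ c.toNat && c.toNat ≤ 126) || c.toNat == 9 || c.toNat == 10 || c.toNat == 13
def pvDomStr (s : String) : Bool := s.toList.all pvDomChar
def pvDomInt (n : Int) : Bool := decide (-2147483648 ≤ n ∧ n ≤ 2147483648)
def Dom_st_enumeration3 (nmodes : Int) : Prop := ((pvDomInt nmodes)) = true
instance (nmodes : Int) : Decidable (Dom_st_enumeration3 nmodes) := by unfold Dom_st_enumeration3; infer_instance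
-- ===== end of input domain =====

-- B computes each output value directly from its position by a closed-form block/parity
-- formula, instead of A's four list-concatenation loops (alternative decomposition).

-- ===== PORT A =====
def st_enumeration3 (nmodes : Int) : List Int :=
  let k := PySem.Int.floordiv nmodes 4 + 1
  let j := PySem.Int.mod (PySem.Int.floordiv nmodes 2) 2
  let numList : List Int := []
  if PySem.Int.mod nmodes 2 = 0 ∧ nmodes > 2 then
    let numList := (PySem.List.pyRange 1 k 1).foldl
      (fun acc i => acc ++ [2 * i - 1] ++ [nmodes - 2 * i + 1]) numList
    let numList := if j = 1 then numList ++ [PySem.Int.floordiv nmodes 2] else numList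
    let numList := (PySem.List.pyRange 1 k 1).foldl
      (fun acc i => acc ++ [2 * i] ++ [nmodes - 2 * i + 2]) numList
    let numList := if j = 1 then numList ++ [PySem.Int.floordiv nmodes 2 + 1] else numList
    let numList := (PySem.List.pyRange 1 k 1).foldl
      (fun acc i => acc ++ [nmodes + 2 * i - 1] ++ [2 * nmodes - 2 * i + 1]) numList
    let numList := if j = 1 then numList ++ [PySem.Int.floordiv nmodes 2 + nmodes] else numList
    let numList := (PySem.List.pyRange 1 k 1).foldl
      (fun acc i => acc ++ [nmodes + 2 * i] ++ [2 * nmodes - 2 * i + 2]) numList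
    let numList := if j = 1 then numList ++ [PySem.Int.floordiv nmodes 2 + nmodes + 1] else numList
    numList
  else
    numList

-- ===== PORT B =====
-- helper 'value' of Source B: the value at output position q, computed from q alone
def pvValueB (n q : Int) : Int :=
  let m := PySem.Int.floordiv n 2
  let b := PySem.Int.floordiv q m
  let p := PySem.Int.mod q m
  let s := 1 + PySem.Int.mod b 2
  let o := n * PySem.Int.floordiv b 2
  if PySem.Int.mod m 2 = 1 ∧ p = m - 1 then o + m + s - 1
  else if PySem.Int.mod p 2 = 0 then o + s + p
  else o + n - p + s - 1

def st_enumeration3_alt (nmodes : Int) : List Int :=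
  if PySem.Int.mod nmodes 2 ≠ 0 ∨ nmodes ≤ 2 then []
  else (PySem.List.pyRange 0 (2 * nmodes) 1).map (pvValueB nmodes)

-- ===== PRECONDITION & SPEC =====
def Spec_st_enumeration3 (nmodes : Int) (out : List Int) : Prop := out = st_enumeration3_alt nmodes
instance (nmodes : Int) (out : List Int) : Decidable (Spec_st_enumeration3 nmodes out) := by unfold Spec_st_enumeration3; infer_instance

-- ===== CLAIM =====
def Claim_equal_st_enumeration3 : Prop := ∀ (nmodes : Int), Dom_st_enumeration3 nmodes → Spec_st_enumeration3 nmodes (st_enumeration3 nmodes)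

-- ===== LEMMAS AND PROOFS =====

-- canonical form of one block of length 2*K + j with parity start s and offset o
def pvBlk (n m : Int) (K : Nat) (j : Nat) (s o : Int) : List Int :=
  ((List.range K).flatMap (fun (t : Nat) => [o + s + 2 * (t : Int), o + n - (2 * (t : Int) + 1) + s - 1]))
    ++ (if j = 1 then [o + m + s - 1] else [])

theorem pv_range_two_mul (g : Nat → Int) (K : Nat) :
    (List.range (2 * K)).map g = (List.range K).flatMap (fun u => [g (2 * u), g (2 * u + 1)]) := by
  induction K with
  | zero => simp
  | succ K ih =>
    have h : 2 * (K + 1) = (2 * K + 1) + 1 := by ring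
    rw [h, List.range_succ, List.range_succ, List.range_succ]
    simp [ih]

theorem pvValueB_eval (N mN b t : Nat) (hN : N = 2 * mN) (h0 : 0 < mN) (ht : t < mN) :
    pvValueB (N : Int) ((b * mN + t : Nat) : Int) =
      if mN % 2 = 1 ∧ t = mN - 1 then (N : Int) * ((b / 2 : Nat) : Int) + (mN : Int) + (1 + ((b % 2 : Nat) : Int)) - 1
      else if t % 2 = 0 then (N : Int) * ((b / 2 : Nat) : Int) + (1 + ((b % 2 : Nat) : Int)) + (t : Int)
      else (N : Int) * ((b / 2 : Nat) : Int) + (N : Int) - (t : Int) + (1 + ((b % 2 : Nat) : Int)) - 1 := by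
  have hm : PySem.Int.floordiv (N : Int) 2 = (mN : Int) := by
    rw [show ((2:Int)) = ((2:Nat):Int) from rfl, PySem.Int.floordiv_natCast]
    norm_cast; omega
  have hb : PySem.Int.floordiv ((b * mN + t : Nat) : Int) ((mN : Nat) : Int) = ((b : Nat) : Int) := by
    rw [PySem.Int.floordiv_natCast]
    norm_cast
    rw [mul_comm, Nat.mul_add_div h0, Nat.div_eq_of_lt ht]; omega
  have hp : PySem.Int.mod ((b * mN + t : Nat) : Int) ((mN : Nat) : Int) = ((t : Nat) : Int) := by
    rw [PySem.Int.mod_natCast]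
    norm_cast
    rw [mul_comm, Nat.mul_add_mod, Nat.mod_eq_of_lt ht]
  have hs : PySem.Int.mod ((b : Nat) : Int) 2 = ((b % 2 : Nat) : Int) := by
    rw [show ((2:Int)) = ((2:Nat):Int) from rfl, PySem.Int.mod_natCast]
  have ho : PySem.Int.floordiv ((b : Nat) : Int) 2 = ((b / 2 : Nat) : Int) := by
    rw [show ((2:Int)) = ((2:Nat):Int) from rfl, PySem.Int.floordiv_natCast]
  have hmm : PySem.Int.mod ((mN : Nat) : Int) 2 = ((mN % 2 : Nat) : Int) := by
    rw [show ((2:Int)) = ((2:Nat):Int) from rfl, PySem.Int.mod_natCast]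
  have hpt : PySem.Int.mod ((t : Nat) : Int) 2 = ((t % 2 : Nat) : Int) := by
    rw [show ((2:Int)) = ((2:Nat):Int) from rfl, PySem.Int.mod_natCast]
  have e1 : (((mN % 2 : Nat) : Int) = 1) ↔ (mN % 2 = 1) := by omega
  have e2 : (((t : Nat) : Int) = (mN : Int) - 1) ↔ (t = mN - 1) := by omega
  have e3 : (((t % 2 : Nat) : Int) = 0) ↔ (t % 2 = 0) := by omega
  simp only [pvValueB, hm, hb, hp, hs, ho, hmm, hpt, e1, e2, e3]

theorem pvBlockB (N mN K j b : Nat) (hm : mN = 2 * K + j) (hj : j = 0 ∨ j = 1)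
    (hN : N = 2 * mN) (h0 : 0 < mN) (f : Nat → Nat) (hf : ∀ t, f t = b * mN + t) :
    (List.range mN).map (fun t => pvValueB (N : Int) ((f t : Nat) : Int)) =
      pvBlk (N : Int) (mN : Int) K j (1 + ((b % 2 : Nat) : Int)) ((N : Int) * ((b / 2 : Nat) : Int)) := by
  have key : ∀ t < mN, pvValueB (N : Int) ((f t : Nat) : Int) =
      if mN % 2 = 1 ∧ t = mN - 1 then (N : Int) * ((b / 2 : Nat) : Int) + (mN : Int) + (1 + ((b % 2 : Nat) : Int)) - 1
      else if t % 2 = 0 then (N : Int) * ((b / 2 : Nat) : Int) + (1 + ((b % 2 : Nat) : Int)) + (t : Int)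
      else (N : Int) * ((b / 2 : Nat) : Int) + (N : Int) - (t : Int) + (1 + ((b % 2 : Nat) : Int)) - 1 := by
    intro t ht
    rw [hf t]
    exact pvValueB_eval N mN b t hN h0 ht
  rcases hj with hj | hj <;> subst hj <;> subst hm
  · -- j = 0 : block is exactly the K pairs
    rw [pvBlk, if_neg (by omega), List.append_nil]
    have h2 : 2 * K + 0 = 2 * K := by omega
    rw [h2, pv_range_two_mul]
    apply List.flatMap_congr
    intro u hu
    have hu' : u < K := List.mem_range.mp hu
    rw [key (2 * u) (by omega), key (2 * u + 1) (by omega)]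
    rw [if_neg (by omega), if_pos (by omega), if_neg (by omega), if_neg (by omega)]
    simp only [List.cons.injEq]
    refine ⟨by push_cast; ring, by push_cast; ring, trivial⟩
  · -- j = 1 : K pairs then the middle element
    rw [pvBlk, if_pos rfl]
    have h2 : 2 * K + 1 = (2 * K) + 1 := rfl
    rw [List.range_succ, List.map_append, pv_range_two_mul]
    congr 1
    · apply List.flatMap_congr
      intro u hu
      have hu' : u < K := List.mem_range.mp hu
      rw [key (2 * u) (by omega), key (2 * u + 1) (by omega)]
      rw [if_neg (by omega), if_pos (by omega), if_neg (by omega), if_neg (by omega)]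
      simp only [List.cons.injEq]
      refine ⟨by push_cast; ring, by push_cast; ring, trivial⟩
    · simp only [List.map_cons, List.map_nil]
      rw [key (2 * K) (by omega), if_pos (by omega)]

-- the whole B-side list in canonical four-block form
theorem pvBside (N mN K j : Nat) (hm : mN = 2 * K + j) (hj : j = 0 ∨ j = 1)
    (hN : N = 2 * mN) (h0 : 0 < mN) :
    (List.range (2 * N)).map (fun (k : Nat) => pvValueB (N : Int) (k : Int)) =
      pvBlk (N : Int) (mN : Int) K j 1 0 ++ (pvBlk (N : Int) (mN : Int) K j 2 0 ++
        (pvBlk (N : Int) (mN : Int) K j 1 (N : Int) ++ pvBlk (N : Int) (mN : Int) K j 2 (N : Int))) := by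
  have B0 : (List.range mN).map (fun (t : Nat) => pvValueB (N : Int) (t : Int))
      = pvBlk (N : Int) (mN : Int) K j 1 0 := by
    have h := pvBlockB N mN K j 0 hm hj hN h0 (fun t => t) (fun t => by show t = 0 * mN + t; omega)
    simpa using h
  have B1 : (List.range mN).map (fun (t : Nat) => pvValueB (N : Int) ((mN + t : Nat) : Int))
      = pvBlk (N : Int) (mN : Int) K j 2 0 := by
    have h := pvBlockB N mN K j 1 hm hj hN h0 (fun t => mN + t) (fun t => by show mN + t = 1 * mN + t; omega)
    simpa using h
  have B2 : (List.range mN).map (fun (t : Nat) => pvValueB (N : Int) ((mN + (mN + t) : Nat) : Int))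
      = pvBlk (N : Int) (mN : Int) K j 1 (N : Int) := by
    have h := pvBlockB N mN K j 2 hm hj hN h0 (fun t => mN + (mN + t)) (fun t => by show mN + (mN + t) = 2 * mN + t; omega)
    simpa [hN] using h
  have B3 : (List.range mN).map (fun (t : Nat) => pvValueB (N : Int) ((mN + (mN + (mN + t)) : Nat) : Int))
      = pvBlk (N : Int) (mN : Int) K j 2 (N : Int) := by
    have h := pvBlockB N mN K j 3 hm hj hN h0 (fun t => mN + (mN + (mN + t))) (fun t => by show mN + (mN + (mN + t)) = 3 * mN + t; omega)
    simpa [hN] using h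
  have hsplit : 2 * N = mN + (mN + (mN + mN)) := by omega
  rw [hsplit]
  simp only [List.range_add, List.map_append, List.map_map, Function.comp_def]
  rw [B0, B1, B2, B3]

theorem pv_main (nmodes : Int) : st_enumeration3 nmodes = st_enumeration3_alt nmodes := by
  by_cases h : PySem.Int.mod nmodes 2 = 0 ∧ nmodes > 2
  · obtain ⟨N, rfl⟩ := Int.eq_ofNat_of_zero_le (by omega : (0 : Int) ≤ nmodes)
    have hN2 : N % 2 = 0 := by
      have h1 := h.1
      rw [show ((2 : Int)) = ((2 : Nat) : Int) from rfl, PySem.Int.mod_natCast] at h1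
      exact_mod_cast h1
    have hN4 : 4 ≤ N := by
      have h2 := h.2
      have : 2 < (N : Int) := h2
      omega
    have hm : N / 2 = 2 * (N / 4) + (N / 2) % 2 := by omega
    have hj : (N / 2) % 2 = 0 ∨ (N / 2) % 2 = 1 := by omega
    have hN2m : N = 2 * (N / 2) := by omega
    have h0 : 0 < N / 2 := by omega
    have hfd4 : PySem.Int.floordiv ((N : Nat) : Int) 4 = ((N / 4 : Nat) : Int) := by
      rw [show ((4 : Int)) = ((4 : Nat) : Int) from rfl, PySem.Int.floordiv_natCast]
    have hfd2 : PySem.Int.floordiv ((N : Nat) : Int) 2 = ((N / 2 : Nat) : Int) := by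
      rw [show ((2 : Int)) = ((2 : Nat) : Int) from rfl, PySem.Int.floordiv_natCast]
    have hmod2 : PySem.Int.mod (((N / 2 : Nat)) : Int) 2 = (((N / 2) % 2 : Nat) : Int) := by
      rw [show ((2 : Int)) = ((2 : Nat) : Int) from rfl, PySem.Int.mod_natCast]
    have hr : PySem.List.pyRange 1 (((N / 4 : Nat) : Int) + 1) 1
        = (List.range (N / 4)).map (fun (t : Nat) => 1 + (t : Int)) := by
      have e : ((((N / 4 : Nat) : Int) + 1) - 1).toNat = N / 4 := by omega
      rw [PySem.List.pyRange_one, e]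
    have hr2 : PySem.List.pyRange 0 (2 * ((N : Nat) : Int)) 1
        = (List.range (2 * N)).map (fun (k : Nat) => (0 : Int) + (k : Int)) := by
      have e : ((2 * ((N : Nat) : Int)) - 0).toNat = 2 * N := by omega
      rw [PySem.List.pyRange_one, e]
    unfold st_enumeration3 st_enumeration3_alt
    rw [if_pos h, if_neg (by rw [not_or]; exact ⟨not_not_intro h.1, not_le.mpr h.2⟩)]
    rw [hr2, List.map_map]
    simp only [Function.comp_def, zero_add]
    rw [pvBside N (N / 2) (N / 4) ((N / 2) % 2) hm hj hN2m h0]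
    rw [hfd4, hfd2, hmod2, hr]
    simp only [PySem.List.foldl_append_eq_flatMap, List.nil_append,
      List.append_assoc, List.flatMap_map]
    rcases hj with hj1 | hj1 <;>
      rw [hj1] <;>
      simp only [Nat.cast_zero, Nat.cast_one, pvBlk] <;>
      · simp only [if_neg (by norm_num : ¬ ((0:Int) = 1)), if_pos (rfl : (1:Nat) = 1),
          if_neg (by omega : ¬ ((0:Nat) = 1)),
          List.append_nil, List.append_assoc, List.nil_append, List.singleton_append,
          List.cons_append]
        push_cast
        ring_nf
        rw [show (fun (a : Nat) => [1 + (a : Int) * 2, -1 - (a : Int) * 2 + (N : Int)])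
              = (fun (t : Nat) => [1 + (t : Int) * 2, -1 + (N : Int) - (t : Int) * 2]) from
            funext fun t => by simp only [List.cons.injEq, and_true, true_and]; ring]
        all_goals simp only [List.append_assoc]
  · unfold st_enumeration3 st_enumeration3_alt
    rw [if_neg h, if_pos]
    rcases Decidable.em (PySem.Int.mod nmodes 2 = 0) with h0 | h0
    · exact Or.inr (by by_contra hc; exact h ⟨h0, lt_of_not_ge hc⟩)
    · exact Or.inl h0

-- ===== VERDICT =====
theorem st_enumeration3_spec : Claim_equal_st_enumeration3 := by
  intro nmodes _
  unfold Spec_st_enumeration3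
  exact pv_main nmodes
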